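-- pv_equiv track=rewrite | github.com/antekone/project-euler | python/24.py | find_quot
-- ===== SOURCE A (Python) =====
-- import math
--
-- def find_quot(max_perm, arr):
--     perm_item_cnt = len(arr)
--     f = math.factorial(perm_item_cnt - 1)
--
--     for x in range(0, perm_item_cnt):
--         r = (1 + x) * f
--         if r > max_perm:
--             next_max_perm = max_perm - x * f
--             return (next_max_perm, x)
--
--     return (f, None)
-- ===== SOURCE B (Python) =====
-- import math
--
-- def find_quot(max_perm, arr):
--     n = len(arr)
--     f = math.factorial(n - 1)
--     x = max(0, max_perm // f)
--     if x < n: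
--         return (max_perm - x * f, x)
--     return (f, None)
-- ===== Notes on version B (the rewrite author's own statement) =====
-- stated objective: simpler
-- what changed: replaces A's linear scan over range(len(arr)) with a single clamped floor division x = max(0, max_perm // f)
import Mathlib
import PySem

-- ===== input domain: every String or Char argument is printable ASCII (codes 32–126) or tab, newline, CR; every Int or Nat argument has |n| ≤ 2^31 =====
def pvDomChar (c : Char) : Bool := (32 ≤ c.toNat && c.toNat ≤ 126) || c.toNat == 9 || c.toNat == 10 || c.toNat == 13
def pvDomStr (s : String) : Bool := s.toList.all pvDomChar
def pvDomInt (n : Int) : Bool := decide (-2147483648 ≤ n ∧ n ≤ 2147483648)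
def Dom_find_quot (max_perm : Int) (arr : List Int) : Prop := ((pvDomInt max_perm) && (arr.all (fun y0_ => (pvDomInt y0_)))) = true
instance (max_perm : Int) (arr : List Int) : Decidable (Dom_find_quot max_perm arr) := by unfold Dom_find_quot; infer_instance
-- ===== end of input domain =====

-- B replaces A's linear scan over range(len(arr)) with one clamped floor division (simpler; runtime is dominated by the factorial either way).

-- ===== PORT A =====
-- the 'for x in range(0, perm_item_cnt)' loop with its early return
def findQuotLoop (max_perm f : Int) : List Int → Int × Option Int
  | [] => (f, none)
  | x :: xs =>
      if (1 + x) * f > max_perm then (max_perm - x * f, some x)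
      else findQuotLoop max_perm f xs

def find_quot (max_perm : Int) (arr : List Int) : Int × Option Int :=
  let perm_item_cnt := arr.length
  let f : Int := (Nat.factorial (perm_item_cnt - 1) : Int)  -- math.factorial (library call)
  findQuotLoop max_perm f (PySem.List.pyRange 0 perm_item_cnt 1)

-- ===== PORT B =====
def find_quot_alt (max_perm : Int) (arr : List Int) : Int × Option Int :=
  let n := arr.length
  let f : Int := (Nat.factorial (n - 1) : Int)  -- math.factorial (library call)
  let x : Int := max 0 (PySem.Int.floordiv max_perm f)
  if x < (n : Int) then (max_perm - x * f, some x) else (f, none)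

-- ===== PRECONDITION & SPEC =====
-- A raises ValueError on arr = [] (math.factorial(-1)); exactly that input is excluded.
def Pre_find_quot (max_perm : Int) (arr : List Int) : Prop := arr ≠ []
instance (max_perm : Int) (arr : List Int) : Decidable (Pre_find_quot max_perm arr) := by
  unfold Pre_find_quot; infer_instance
def pvWitness_find_quot : Int × List Int := (10, [1, 2, 3])

def Spec_find_quot (max_perm : Int) (arr : List Int) (out : Int × Option Int) : Prop := out = find_quot_alt max_perm arr
instance (max_perm : Int) (arr : List Int) (out : Int × Option Int) : Decidable (Spec_find_quot max_perm arr out) := by unfold Spec_find_quot; infer_instance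

-- ===== CLAIM (what is proved, stated in full; the proofs are below) =====
def Claim_equal_find_quot : Prop := ∀ (max_perm : Int) (arr : List Int), Dom_find_quot max_perm arr → Pre_find_quot max_perm arr → Spec_find_quot max_perm arr (find_quot max_perm arr)

-- ===== LEMMAS AND PROOFS =====

-- A's scan over pyRange s n 1, started at any s below the clamped quotient q,
-- returns B's answer.
lemma findQuotLoop_eq (m f : Int) (hf : 0 < f) (k : Nat) :
    ∀ s n : Int, (n - s).toNat = k → 0 ≤ s → s ≤ max 0 (PySem.Int.floordiv m f) →
    findQuotLoop m f (PySem.List.pyRange s n 1) =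
      (if max 0 (PySem.Int.floordiv m f) < n then
        (m - max 0 (PySem.Int.floordiv m f) * f, some (max 0 (PySem.Int.floordiv m f)))
      else (f, none)) := by
  induction k with
  | zero =>
      intro s n hk h0 hsq
      have hns : n ≤ s := by omega
      rw [PySem.List.pyRange_one_eq_nil hns]
      have : ¬ max 0 (PySem.Int.floordiv m f) < n := by omega
      simp [findQuotLoop, this]
  | succ k ih =>
      intro s n hk h0 hsq
      have hsn : s < n := by omega
      rw [PySem.List.pyRange_one_cons hsn]
      have hbr : (1 + s) * f > m ↔ PySem.Int.floordiv m f < s + 1 := by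
        rw [PySem.Int.floordiv_lt_iff_lt_mul hf]
        constructor <;> intro h <;> linarith
      by_cases hq : max 0 (PySem.Int.floordiv m f) ≤ s
      · -- s = q: the branch fires
        have hfd : PySem.Int.floordiv m f < s + 1 := by omega
        have hs : s = max 0 (PySem.Int.floordiv m f) := by omega
        have hqn : max 0 (PySem.Int.floordiv m f) < n := by omega
        have hcond : (1 + s) * f > m := hbr.mpr hfd
        rw [← hs] at hqn ⊢
        simp [findQuotLoop, hcond, hqn]
      · -- s < q: the branch does not fire, recurse
        have hfd : ¬ PySem.Int.floordiv m f < s + 1 := by omega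
        have : ¬ (1 + s) * f > m := fun h => hfd (hbr.mp h)
        simp only [findQuotLoop, this, if_false]
        exact ih (s + 1) n (by omega) (by omega) (by omega)

-- ===== VERDICT (by name: the statement is the Claim_ definition above) =====
theorem find_quot_spec : Claim_equal_find_quot := by
  intro m arr _ hpre
  unfold Spec_find_quot find_quot find_quot_alt
  have hf : (0 : Int) < (Nat.factorial (arr.length - 1) : Int) := by
    exact_mod_cast Nat.factorial_pos _
  have h0 : (0 : Int) ≤ max 0 (PySem.Int.floordiv m (Nat.factorial (arr.length - 1) : Int)) :=
    le_max_left _ _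
  simpa using findQuotLoop_eq m (Nat.factorial (arr.length - 1) : Int) hf
    (((arr.length : Int) - 0).toNat) 0 (arr.length : Int) rfl le_rfl h0
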